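-- pv_equiv track=rewrite | github.com/pypi-data/pypi-mirror-176 | packages/letterparser/letterparser-0.14.0.tar.gz/letterparser-0.14.0/letterparser/generate.py | sort_labels
-- ===== SOURCE A (Python) =====
-- def sort_labels(labels_data):
--     "sort asset labels with unique ones first then the rest"
--     unique_labels = [
--         match_group for match_group in labels_data if match_group.get("unique")
--     ]
--     non_unique_labels = [
--         match_group for match_group in labels_data if not match_group.get("unique")
--     ]
--     return unique_labels + non_unique_labels
-- ===== SOURCE B (Python) =====
-- def sort_labels(labels_data):
--     "sort asset labels with unique ones first then the rest"
--     return sorted(labels_data, key=lambda match_group: not match_group.get("unique"))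
-- ===== Notes on version B (the rewrite author's own statement) =====
-- stated objective: idiomatic
-- what changed: Replaces two filtering passes plus concatenation with a single stable sort keyed on the negated truthiness of the 'unique' flag; sort stability preserves the original relative order within each block.
import Mathlib
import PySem

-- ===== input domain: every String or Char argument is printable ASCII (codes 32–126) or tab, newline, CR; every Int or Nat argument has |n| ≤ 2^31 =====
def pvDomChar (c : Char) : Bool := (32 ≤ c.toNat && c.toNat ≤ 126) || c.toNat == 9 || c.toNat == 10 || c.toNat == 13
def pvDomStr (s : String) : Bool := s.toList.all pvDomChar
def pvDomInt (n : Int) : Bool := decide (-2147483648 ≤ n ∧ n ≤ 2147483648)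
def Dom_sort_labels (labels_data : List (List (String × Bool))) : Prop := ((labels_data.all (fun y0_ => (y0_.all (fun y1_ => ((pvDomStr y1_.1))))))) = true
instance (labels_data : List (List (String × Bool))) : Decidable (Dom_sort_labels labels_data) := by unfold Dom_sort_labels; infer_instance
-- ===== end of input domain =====

-- B replaces A's two filtering passes + concatenation by one stable sort keyed
-- on the negated 'unique' flag; same return value, chosen for idiomatic brevity.

-- ===== PORT A =====
def sort_labels (labels_data : List (List (String × Bool))) : List (List (String × Bool)) :=
  let unique_labels :=
    labels_data.filter (fun match_group => (((PySem.Dict.mk match_group).get? "unique").getD false))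
  let non_unique_labels :=
    labels_data.filter (fun match_group => !(((PySem.Dict.mk match_group).get? "unique").getD false))
  unique_labels ++ non_unique_labels

-- ===== PORT B =====
def sort_labels_alt (labels_data : List (List (String × Bool))) : List (List (String × Bool)) :=
  PySem.List.sorted labels_data
    (fun match_group => !(PySem.Dict.getD (PySem.Dict.mk match_group) "unique" false)) false

-- ===== PRECONDITION & SPEC =====
def Spec_sort_labels (labels_data : List (List (String × Bool))) (out : List (List (String × Bool))) : Prop := out = sort_labels_alt labels_data
instance (labels_data : List (List (String × Bool))) (out : List (List (String × Bool))) : Decidable (Spec_sort_labels labels_data out) := by unfold Spec_sort_labels; infer_instance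

-- ===== CLAIM (what is proved, stated in full; the proofs are below) =====
def Claim_equal_sort_labels : Prop := ∀ (labels_data : List (List (String × Bool))), Dom_sort_labels labels_data → Spec_sort_labels labels_data (sort_labels labels_data)

-- ===== LEMMAS AND PROOFS =====

-- inserting a key-false (unique) element into "falses ++ trues" puts it right after the falses
theorem pv_insert_true {α : Type} (p : α → Bool) (x : α) (F T : List α)
    (hx : p x = true) (hF : ∀ y ∈ F, p y = true) (hT : ∀ y ∈ T, p y = false) :
    PySem.List.insertBy (fun a b => decide ((!p a) < (!p b))) x (F ++ T) = F ++ x :: T := by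
  induction F with
  | nil =>
    simp only [List.nil_append]
    cases T with
    | nil => simp [PySem.List.insertBy]
    | cons y ys =>
      have hy := hT y (by simp)
      simp [PySem.List.insertBy, hx, hy]
  | cons f F ih =>
    have hf := hF f (by simp)
    simp only [List.cons_append, PySem.List.insertBy, hx, hf]
    simp only [decide_eq_true_eq]
    rw [if_neg (by simp)]
    rw [ih (fun y hy => hF y (by simp [hy]))]

-- inserting a key-true (non-unique) element appends it at the end
theorem pv_insert_false {α : Type} (p : α → Bool) (x : α) (L : List α)
    (hx : p x = false) :
    PySem.List.insertBy (fun a b => decide ((!p a) < (!p b))) x L = L ++ [x] := by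
  apply PySem.List.insertBy_of_forall_not_before
  intro y _
  simp [hx]

-- the insertion-sort fold keeps the two blocks of the partition
theorem pv_fold_partition {α : Type} (p : α → Bool) (xs F T : List α)
    (hF : ∀ y ∈ F, p y = true) (hT : ∀ y ∈ T, p y = false) :
    xs.foldl (fun acc x => PySem.List.insertBy (fun a b => decide ((!p a) < (!p b))) x acc) (F ++ T)
      = (F ++ xs.filter (fun y => p y)) ++ (T ++ xs.filter (fun y => !p y)) := by
  induction xs generalizing F T with
  | nil => simp
  | cons x xs ih =>
    simp only [List.foldl_cons]
    by_cases hx : p x = true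
    · rw [pv_insert_true p x F T hx hF hT]
      have hF' : ∀ y ∈ F ++ [x], p y = true := by
        intro y hy
        rcases List.mem_append.mp hy with h | h
        · exact hF y h
        · simp only [List.mem_singleton] at h; subst h; exact hx
      have hstep : F ++ x :: T = (F ++ [x]) ++ T := by simp
      rw [hstep, ih (F ++ [x]) T hF' hT]
      simp [hx]
    · have hx' : p x = false := by simpa using hx
      rw [pv_insert_false p x (F ++ T) hx', List.append_assoc]
      have hT' : ∀ y ∈ T ++ [x], p y = false := by
        intro y hy
        rcases List.mem_append.mp hy with h | h
        · exact hT y h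
        · simp only [List.mem_singleton] at h; subst h; exact hx'
      rw [ih F (T ++ [x]) hF hT']
      simp [hx', List.append_assoc]

-- ===== VERDICT (by name: the statement is the Claim_ definition above) =====
theorem sort_labels_spec : Claim_equal_sort_labels := by
  intro labels_data _
  unfold Spec_sort_labels sort_labels sort_labels_alt
  rw [PySem.List.sorted_eq_foldl_insertBy]
  have h := pv_fold_partition
      (fun mg : List (String × Bool) => (((PySem.Dict.mk mg).get? "unique").getD false))
      labels_data [] [] (by simp) (by simp)
  simp only [PySem.Dict.getD_eq_get?_getD]
  simpa using h.symm
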